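-- pv_equiv track=rewrite | github.com/raulpenaguiao/discrete_signature_varieties_macaulay2 | degree_moebius.py | initialize_compositions
-- ===== SOURCE A (Python) =====
-- def initialize_compositions(lim = 15):
--     """
--     Initialize compositions of integers.
--     """
--     # Initialize a list to store compositions
--     compositions = []
--
--     # Start with compositions of 0
--     new_compositions = [[]]  # Compositions of 0
--     compositions.append(new_compositions[:])
--
--     # Add compositions of 1
--     new_compositions = [[1]]  # Compositions of 1
--     compositions.append(new_compositions[:])
--
--     # Generate compositions for integers up to `lim`
--     for i in range(2, lim):
--         old_compositions = new_compositions[:]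
--         new_compositions = []
--         for alpha in old_compositions:
--             # Add a new part of size 1 to the composition
--             new_alpha = alpha[:]
--             new_compositions.append(new_alpha[:] + [1])
--             # Increment the last part of the composition
--             new_alpha[-1] += 1
--             new_compositions.append(new_alpha[:])
--         compositions.append(new_compositions[:])
--
--     return compositions
-- ===== SOURCE B (Python) =====
-- def initialize_compositions(lim=15):
--     """
--     Initialize compositions of integers.
--     """
--     # comps[n] = compositions of n, each built by choosing the FIRST part k in 1..n
--     # and prefixing it onto a composition of n - k.
--     comps = [[[]]]
--     for n in range(1, max(lim, 2)):
--         comps.append([[k] + rest for k in range(1, n + 1) for rest in comps[n - k]])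
--     return comps
-- ===== Notes on version B (the rewrite author's own statement) =====
-- stated objective: alternative
-- what changed: Replaces A's transformation of the previous size's compositions (append a part 1 / increment the last part of each) by a bottom-up first-part recurrence comps[n] = [[k]+rest for k in 1..n for rest in comps[n-k]], which produces the same per-size lists in the same order.
import Mathlib
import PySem

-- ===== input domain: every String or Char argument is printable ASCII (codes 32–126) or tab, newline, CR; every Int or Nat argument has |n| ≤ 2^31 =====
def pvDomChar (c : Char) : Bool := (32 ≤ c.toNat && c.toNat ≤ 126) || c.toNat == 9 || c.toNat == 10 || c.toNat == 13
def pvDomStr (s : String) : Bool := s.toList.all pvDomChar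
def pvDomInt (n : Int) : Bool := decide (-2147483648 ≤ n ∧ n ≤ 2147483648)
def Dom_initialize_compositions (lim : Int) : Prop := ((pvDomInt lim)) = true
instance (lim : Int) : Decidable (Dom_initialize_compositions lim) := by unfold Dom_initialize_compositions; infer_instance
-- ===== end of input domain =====

-- B replaces A's transform of the previous size's compositions (append 1 / increment last part)
-- by a bottom-up first-part recurrence comps[n] = [k :: rest | k in 1..n, rest in comps[n-k]],
-- producing the same lists in the same order (objective: alternative).

-- ===== PORT A =====
/-- `new_alpha[-1] += 1`: increment the last element. The loop only reaches nonempty lists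
    (on `[]` Python would raise IndexError; that case is unreachable here). -/
def pyIncLast (l : List Int) : List Int :=
  l.dropLast ++ (match l.getLast? with | some x => [x + 1] | none => [])

def initialize_compositions (lim : Int) : List (List (List Int)) :=
  -- compositions = [[[]]]; then append [[1]]
  let compositions : List (List (List Int)) := [[[]]] ++ [[[1]]]
  -- for i in range(2, lim): build new_compositions from the previous ones
  ((PySem.List.pyRange 2 lim 1).foldl
    (fun (s : List (List (List Int)) × List (List Int)) _i =>
      let nc := s.2.foldl (fun acc alpha => acc ++ [alpha ++ [1], pyIncLast alpha]) []
      (s.1 ++ [nc], nc))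
    (compositions, [[1]])).1

-- ===== PORT B =====
def initialize_compositions_alt (lim : Int) : List (List (List Int)) :=
  -- comps = [[[]]]; for n in range(1, max(lim, 2)): comps.append([[k]+rest for k in 1..n for rest in comps[n-k]])
  (PySem.List.pyRange 1 (max lim 2) 1).foldl
    (fun comps n =>
      comps ++ [(PySem.List.pyRange 1 (n + 1) 1).flatMap
        (fun k => (PySem.List.pyGetD comps (n - k) []).map (fun rest => k :: rest))])
    [[[]]]

-- ===== PRECONDITION & SPEC =====
def Spec_initialize_compositions (lim : Int) (out : List (List (List Int))) : Prop := out = initialize_compositions_alt lim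
instance (lim : Int) (out : List (List (List Int))) : Decidable (Spec_initialize_compositions lim out) := by unfold Spec_initialize_compositions; infer_instance

-- ===== CLAIM (what is proved, stated in full; the proofs are below) =====
def Claim_equal_initialize_compositions : Prop := ∀ (lim : Int), Dom_initialize_compositions lim → Spec_initialize_compositions lim (initialize_compositions lim)

-- ===== LEMMAS AND PROOFS =====

/-- Specification recursion: compositions of `n` by first part (proof-only helper). -/
def compB : Nat → List (List Int)
  | 0 => [[]]
  | n+1 => (List.range (n+1)).flatMap
      (fun i => (compB (n - i)).map (fun rest => ((i + 1 : Nat) : Int) :: rest))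
decreasing_by exact Nat.lt_succ_of_le (Nat.sub_le n i)

/-- A's inner loop as a flatMap. -/
def stepF (l : List (List Int)) : List (List Int) :=
  l.flatMap (fun alpha => [alpha ++ [1], pyIncLast alpha])

lemma foldl_eq_stepF (l : List (List Int)) :
    l.foldl (fun acc alpha => acc ++ [alpha ++ [1], pyIncLast alpha]) [] = stepF l := by
  simpa [stepF] using
    PySem.List.foldl_append_eq_flatMap (fun alpha => [alpha ++ [1], pyIncLast alpha]) l []

lemma compB_ne_nil (n : Nat) : ∀ c ∈ compB (n+1), c ≠ [] := by
  intro c hc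
  rw [compB] at hc
  simp only [List.mem_flatMap, List.mem_map] at hc
  obtain ⟨i, -, rest, -, rfl⟩ := hc
  simp

lemma pyIncLast_cons (a : Int) (c : List Int) (h : c ≠ []) :
    pyIncLast (a :: c) = a :: pyIncLast c := by
  cases c with
  | nil => exact absurd rfl h
  | cons d cs => simp [pyIncLast]

lemma stepF_map_cons (a : Int) (L : List (List Int)) (h : ∀ c ∈ L, c ≠ []) :
    stepF (L.map (a :: ·)) = (stepF L).map (a :: ·) := by
  induction L with
  | nil => simp [stepF]
  | cons c L ih =>
    have hc : c ≠ [] := h c (by simp)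
    have hL : ∀ x ∈ L, x ≠ [] := fun x hx => h x (by simp [hx])
    simp only [List.map_cons, stepF, List.flatMap_cons] at ih ⊢
    rw [pyIncLast_cons a c hc, ih hL]
    simp

lemma stepF_compB : ∀ n : Nat, 1 ≤ n → stepF (compB n) = compB (n+1) := by
  intro n
  induction n using Nat.strong_induction_on with
  | _ n ih =>
    intro h1
    obtain ⟨k, rfl⟩ : ∃ k, n = k + 1 := ⟨n - 1, by omega⟩
    rw [compB]
    unfold stepF
    rw [List.flatMap_assoc]
    have hsplit : ∀ i ∈ List.range k,
        (((compB (k - i)).map (fun rest => ((i + 1 : Nat) : Int) :: rest)).flatMap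
          (fun alpha => [alpha ++ [1], pyIncLast alpha]))
        = (compB (k + 1 - i)).map (fun rest => ((i + 1 : Nat) : Int) :: rest) := by
      intro i hi
      have hik : i < k := List.mem_range.mp hi
      have h1i : 1 ≤ k - i := by omega
      have hlt : k - i < k + 1 := by omega
      have hne : ∀ c ∈ compB (k - i), c ≠ [] := by
        obtain ⟨j, hj⟩ : ∃ j, k - i = j + 1 := ⟨k - i - 1, by omega⟩
        rw [hj]; exact compB_ne_nil j
      calc ((compB (k - i)).map (fun rest => ((i + 1 : Nat) : Int) :: rest)).flatMap
              (fun alpha => [alpha ++ [1], pyIncLast alpha])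
          = stepF ((compB (k - i)).map (((i + 1 : Nat) : Int) :: ·)) := rfl
        _ = (stepF (compB (k - i))).map (((i + 1 : Nat) : Int) :: ·) :=
              stepF_map_cons _ _ hne
        _ = (compB (k - i + 1)).map (fun rest => ((i + 1 : Nat) : Int) :: rest) := by
              rw [ih (k - i) hlt h1i]
        _ = (compB (k + 1 - i)).map (fun rest => ((i + 1 : Nat) : Int) :: rest) := by
              rw [show k - i + 1 = k + 1 - i from by omega]
    rw [List.range_succ, List.flatMap_append, List.flatMap_congr hsplit]
    conv_rhs => rw [compB]
    rw [show k + 1 + 1 = (k + 1) + 1 from rfl, List.range_succ, List.range_succ,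
        List.flatMap_append, List.flatMap_append, List.append_assoc]
    congr 1
    simp only [List.flatMap_singleton, Nat.sub_self, Nat.add_sub_cancel_left]
    simp [compB, pyIncLast]

lemma fold_inv : ∀ m : Nat, 2 ≤ m →
    ((PySem.List.pyRange 2 (m : Int) 1).foldl
      (fun (s : List (List (List Int)) × List (List Int)) _i =>
        let nc := s.2.foldl (fun acc alpha => acc ++ [alpha ++ [1], pyIncLast alpha]) []
        (s.1 ++ [nc], nc))
      ([[[]], [[1]]], [[1]])) = ((List.range m).map compB, compB (m-1)) := by
  intro m hm
  induction m, hm using Nat.le_induction with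
  | base =>
    rw [PySem.List.pyRange_one_eq_nil (by norm_num)]
    simp [List.range_succ, compB]
  | succ n hn ih =>
    have hc : ((n + 1 : Nat) : Int) = (n : Int) + 1 := by push_cast; ring
    rw [hc, PySem.List.pyRange_one_succ_right (by exact_mod_cast hn), List.foldl_append]
    rw [ih]
    simp only [List.foldl_cons, List.foldl_nil]
    rw [foldl_eq_stepF, stepF_compB (n - 1) (by omega)]
    rw [show n - 1 + 1 = n from by omega, List.range_succ, List.map_append]
    simp

lemma buildRow (n : Nat) (h : 1 ≤ n) :
    ((PySem.List.pyRange 1 ((n : Int) + 1) 1).flatMap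
      (fun k => (PySem.List.pyGetD ((List.range n).map compB) ((n : Int) - k) []).map
        (fun rest => k :: rest)))
    = compB n := by
  obtain ⟨j, rfl⟩ : ∃ j, n = j + 1 := ⟨n - 1, by omega⟩
  rw [PySem.List.pyRange_one,
      show (((j + 1 : Nat) : Int) + 1 - 1) = ((j + 1 : Nat) : Int) from by ring,
      Int.toNat_natCast, List.flatMap_map, compB]
  apply List.flatMap_congr
  intro i hi
  have hij : i < j + 1 := List.mem_range.mp hi
  have hidx : ((j + 1 : Nat) : Int) - (1 + (i : Int)) = ((j - i : Nat) : Int) := by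
    push_cast [Nat.cast_sub (by omega : i ≤ j)]; ring
  rw [hidx, PySem.List.pyGetD_natCast]
  have hv : ((List.range (j + 1)).map compB).getD (j - i) [] = compB (j - i) := by
    simp [List.getD]
  rw [hv]
  have hk : (1 + (i : Int)) = ((i + 1 : Nat) : Int) := by push_cast; ring
  rw [hk]

lemma foldB_inv : ∀ m : Nat, 1 ≤ m →
    ((PySem.List.pyRange 1 (m : Int) 1).foldl
      (fun comps n =>
        comps ++ [(PySem.List.pyRange 1 (n + 1) 1).flatMap
          (fun k => (PySem.List.pyGetD comps (n - k) []).map (fun rest => k :: rest))])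
      [[[]]]) = (List.range m).map compB := by
  intro m hm
  induction m, hm using Nat.le_induction with
  | base =>
    rw [PySem.List.pyRange_one_eq_nil (by norm_num)]
    simp [List.range_succ, compB]
  | succ n hn ih =>
    have hc : ((n + 1 : Nat) : Int) = (n : Int) + 1 := by push_cast; ring
    rw [hc, PySem.List.pyRange_one_succ_right (by exact_mod_cast hn), List.foldl_append, ih]
    simp only [List.foldl_cons, List.foldl_nil]
    rw [buildRow n hn, List.range_succ, List.map_append]
    simp

-- ===== VERDICT (by name: the statement is the Claim_ definition above) =====
theorem initialize_compositions_spec : Claim_equal_initialize_compositions := by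
  intro lim _dom
  unfold Spec_initialize_compositions initialize_compositions initialize_compositions_alt
  dsimp only
  have hmax : (2:Int) ≤ max lim 2 := le_max_right lim 2
  have hMcast : (((max lim 2).toNat : Nat) : Int) = max lim 2 := Int.toNat_of_nonneg (by omega)
  have hMge : 1 ≤ (max lim 2).toNat := by omega
  have hB := foldB_inv (max lim 2).toNat hMge
  rw [hMcast] at hB
  rw [hB]
  by_cases h : lim ≤ 2
  · rw [PySem.List.pyRange_one_eq_nil h, max_eq_right h]
    have h2 : (2:Int).toNat = 2 := rfl
    rw [h2]
    simp [List.range_succ, compB]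
  · rw [not_le] at h
    have hm : max lim 2 = lim := max_eq_left (le_of_lt h)
    have hnn : (0:Int) ≤ lim := by omega
    have hcast : ((lim.toNat : Nat) : Int) = lim := Int.toNat_of_nonneg hnn
    have hge : 2 ≤ lim.toNat := by omega
    have hf := fold_inv lim.toNat hge
    rw [hcast] at hf
    dsimp only at hf
    simp only [List.cons_append, List.nil_append]
    rw [hm]
    rw [hf]
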